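-- pv_equiv track=rewrite | github.com/hissanova/okinawago_dictionary | src/kanahyouki.py | _sokuon_n_hatsuon_to_ipa
-- ===== SOURCE A (Python) =====
-- from typing import Any, Dict, List, NamedTuple, Tuple
--
-- def scroll_list(list_: List[Any]) -> List[List[Any]]:
--     """ [e0, e1, e2..., en] -> [[e0, e1], [e1, e2],...,[e_n, None]]
--     """
--     return [
--         list_[i:i + 2] if len(list_[i:i + 2]) == 2 else [list_[i], None]
--         for i in range(len(list_))
--     ]
--
-- def _sokuon_n_hatsuon_to_ipa(
--         ipa_syllables: List[List[str]]) -> List[List[str]]: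
--     """
--     促音 /Q/ と 撥音 /N/ の実際の音声は、その後に来る子音によって変わるので後ろの子音で、条件分岐処理する。
--     """
--     new_ipa_syllables = []
--     new_syllable = [""]
--     for syllable1, syllable2 in scroll_list(ipa_syllables):
--         if syllable1 == ["N"]:
--             if syllable2 is None:
--                 new_syllable = ["\u0274"]  # IPA 口蓋垂鼻音 "ɴ"
--             elif syllable2[0][0] in ["m", "p", "b"]:
--                 new_syllable = ["m"]
--             elif syllable2[0][0] in ["k", "ɡ"]:
--                 new_syllable = ["ŋ"]
--             else:
--                 new_syllable = ["n"]
--         elif syllable1 == ["Q"]: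
--             if syllable2 is not None:
--                 new_syllable = [s[0] for s in syllable2]
--             else:
--                 new_syllable = [""]
--         else:
--             new_syllable = syllable1
--         new_ipa_syllables.append(new_syllable)
--
--     return new_ipa_syllables
-- ===== SOURCE B (Python) =====
-- from typing import List
--
--
-- def _sokuon_n_hatsuon_to_ipa(
--         ipa_syllables: List[List[str]]) -> List[List[str]]:
--     # Single reverse-order pass: thread the syllable seen last (the *next*
--     # syllable in original order) as an accumulator, no pair list materialised.
--     out: List[List[str]] = []
--     nxt = None
--     for syllable in reversed(ipa_syllables):
--         if syllable == ["N"]: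
--             if nxt is None:
--                 new = ["\u0274"]
--             elif nxt[0][0] in ["m", "p", "b"]:
--                 new = ["m"]
--             elif nxt[0][0] in ["k", "\u0261"]:
--                 new = ["\u014b"]
--             else:
--                 new = ["n"]
--         elif syllable == ["Q"]:
--             new = [s[0] for s in nxt] if nxt is not None else [""]
--         else:
--             new = syllable
--         out.append(new)
--         nxt = syllable
--     out.reverse()
--     return out
-- ===== Notes on version B (the rewrite author's own statement) =====
-- stated objective: alternative
-- what changed: Dropped the scroll_list helper that materialises all (syllable, next) pairs via slicing and replaced the forward scan over those pairs by a single reverse-order pass threading the following syllable as an accumulator.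
import Mathlib
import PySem

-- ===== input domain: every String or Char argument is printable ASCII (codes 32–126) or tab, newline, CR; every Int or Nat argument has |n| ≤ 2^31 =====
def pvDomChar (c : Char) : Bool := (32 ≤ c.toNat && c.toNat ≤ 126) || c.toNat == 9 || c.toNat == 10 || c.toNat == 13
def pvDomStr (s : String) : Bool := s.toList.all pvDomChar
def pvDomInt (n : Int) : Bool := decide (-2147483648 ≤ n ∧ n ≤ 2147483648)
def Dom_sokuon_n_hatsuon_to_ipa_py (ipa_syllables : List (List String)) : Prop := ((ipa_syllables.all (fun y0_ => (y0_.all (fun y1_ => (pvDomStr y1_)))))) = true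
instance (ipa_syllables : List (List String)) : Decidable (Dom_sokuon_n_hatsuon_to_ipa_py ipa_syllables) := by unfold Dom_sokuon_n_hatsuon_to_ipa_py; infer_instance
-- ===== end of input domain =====

-- B replaces A's materialised scroll_list of (syllable, next) pairs + forward scan by a single
-- reverse-order pass that threads the following syllable as an accumulator (objective: alternative).

-- s[0] for a string s: first char as a 1-char string; the "" default is hit only where Python raises (excluded by Pre_)
def pvHeadChar (s : String) : String :=
  match s.toList with
  | [] => ""
  | c :: _ => String.ofList [c]

-- ===== PORT A =====
-- scroll_list: the i-th entry is list_[i:i+2] if it has length 2, else [list_[i], None]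
def pvScroll (l : List (List String)) : List ((List String) × Option (List String)) :=
  (PySem.List.pyRange 0 l.length 1).map (fun i =>
    let s := PySem.List.slice l (some i) (some (i + 2))
    if s.length = 2 then (s.getD 0 [], some (s.getD 1 []))
    else ((PySem.List.pyGet? l i).getD [], none))

def sokuon_n_hatsuon_to_ipa_py (ipa_syllables : List (List String)) : List (List String) :=
  (pvScroll ipa_syllables).foldl (fun new_ipa_syllables p =>
    let new_syllable :=
      if p.1 = ["N"] then
        match p.2 with
        | none => ["\u0274"]
        | some y2 =>
          if pvHeadChar (y2.getD 0 "") ∈ (["m", "p", "b"] : List String) then ["m"]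
          else if pvHeadChar (y2.getD 0 "") ∈ (["k", "\u0261"] : List String) then ["\u014b"]
          else ["n"]
      else if p.1 = ["Q"] then
        match p.2 with
        | some y2 => y2.map (fun s => pvHeadChar s)
        | none => [""]
      else p.1
    new_ipa_syllables ++ [new_syllable]) []

-- ===== PORT B =====
-- reverse pass: nxt carries the syllable processed just before, i.e. the next one in original order
def pvAltGo : List (List String) → Option (List String) → List (List String)
  | [], _ => []
  | syllable :: rest, nxt =>
    let new :=
      if syllable = ["N"] then
        match nxt with
        | none => ["\u0274"]
        | some y =>
          if pvHeadChar (y.getD 0 "") ∈ (["m", "p", "b"] : List String) then ["m"]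
          else if pvHeadChar (y.getD 0 "") ∈ (["k", "\u0261"] : List String) then ["\u014b"]
          else ["n"]
      else if syllable = ["Q"] then
        match nxt with
        | some y => y.map (fun s => pvHeadChar s)
        | none => [""]
      else syllable
    new :: pvAltGo rest (some syllable)

def sokuon_n_hatsuon_to_ipa_py_alt (ipa_syllables : List (List String)) : List (List String) :=
  (pvAltGo ipa_syllables.reverse none).reverse

-- ===== PRECONDITION & SPEC =====
-- Pre_ excludes exactly the inputs where A raises (IndexError): a ["N"] syllable followed by an
-- empty syllable or by one whose first string is "", and a ["Q"] syllable followed by a syllable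
-- containing "". B raises there too, so nothing A returns on is excluded.
def Pre_sokuon_n_hatsuon_to_ipa_py (ipa_syllables : List (List String)) : Prop :=
  ∀ p ∈ ipa_syllables.zip ipa_syllables.tail,
    (p.1 = ["N"] → p.2 ≠ [] ∧ p.2.headI ≠ "") ∧
    (p.1 = ["Q"] → ∀ s ∈ p.2, s ≠ "")
instance (ipa_syllables : List (List String)) : Decidable (Pre_sokuon_n_hatsuon_to_ipa_py ipa_syllables) := by unfold Pre_sokuon_n_hatsuon_to_ipa_py; infer_instance

def pvWitness_sokuon_n_hatsuon_to_ipa_py : List (List String) :=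
  [["a"], ["N"], ["ka"], ["Q"], ["ta"]]

def Spec_sokuon_n_hatsuon_to_ipa_py (ipa_syllables : List (List String)) (out : List (List String)) : Prop := out = sokuon_n_hatsuon_to_ipa_py_alt ipa_syllables
instance (ipa_syllables : List (List String)) (out : List (List String)) : Decidable (Spec_sokuon_n_hatsuon_to_ipa_py ipa_syllables out) := by unfold Spec_sokuon_n_hatsuon_to_ipa_py; infer_instance

-- ===== CLAIM (what is proved, stated in full; the proofs are below) =====
def Claim_equal_sokuon_n_hatsuon_to_ipa_py : Prop := ∀ (ipa_syllables : List (List String)), Dom_sokuon_n_hatsuon_to_ipa_py ipa_syllables → Pre_sokuon_n_hatsuon_to_ipa_py ipa_syllables → Spec_sokuon_n_hatsuon_to_ipa_py ipa_syllables (sokuon_n_hatsuon_to_ipa_py ipa_syllables)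

-- ===== LEMMAS AND PROOFS =====

-- the per-syllable conversion both programs perform, named for the proofs
def pvConv (a : List String) (b : Option (List String)) : List String :=
  if a = ["N"] then
    match b with
    | none => ["\u0274"]
    | some y =>
      if pvHeadChar (y.getD 0 "") ∈ (["m", "p", "b"] : List String) then ["m"]
      else if pvHeadChar (y.getD 0 "") ∈ (["k", "\u0261"] : List String) then ["\u014b"]
      else ["n"]
  else if a = ["Q"] then
    match b with
    | some y => y.map (fun s => pvHeadChar s)
    | none => [""]
  else a

-- look-ahead map: convert each element with its successor; the last one with nxt
def pvMapLA : List (List String) → Option (List String) → List (List String)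
  | [], _ => []
  | a :: t, nxt =>
    pvConv a (match t with | [] => nxt | b :: _ => some b) :: pvMapLA t nxt

theorem pvScroll_cons (a : List String) (t : List (List String)) :
    pvScroll (a :: t) =
      (match t with | [] => (a, none) | b :: _ => (a, some b)) :: pvScroll t := by
  unfold pvScroll
  have h1 : ((a :: t).length : Int) = ((t.length : Int) + 1) := by simp
  rw [h1, PySem.List.pyRange_one_cons (by positivity), List.map_cons,
      show (0:Int)+1 = 1 from by norm_num,
      PySem.List.pyRange_one 1, PySem.List.pyRange_one 0]
  have h2 : ((t.length : Int) + 1 - 1).toNat = t.length := by omega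
  have h3 : ((t.length : Int) - 0).toNat = t.length := by omega
  rw [h2, h3, List.map_map, List.map_map]
  congr 1
  · -- head entry: slice is take 2; the pair depends on whether t is empty
    have hs : PySem.List.slice (a :: t) (none : Option Int) (some 2) = (a :: t).take 2 := by
      rw [PySem.List.slice_to _ (by norm_num)]; rfl
    rw [show ((0:Int)+2) = 2 from by norm_num]
    simp only [PySem.List.slice_zero_start, hs]
    cases t with
    | nil => simp
    | cons b t' => simp
  · -- tail entries: index i+1 into a :: t is index i into t
    apply List.map_congr_left
    intro k _
    simp only [Function.comp]
    rw [show (1 : Int) + (k : Int) = ((k + 1 : Nat) : Int) by omega]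
    rw [show ((k+1:Nat):Int) + 2 = ((k + 3 : Nat) : Int) by omega]
    rw [show (0 : Int) + (k : Int) = ((k : Nat) : Int) by omega,
        show ((k:Nat):Int) + 2 = ((k + 2 : Nat) : Int) by omega]
    rw [PySem.List.slice_natCast, PySem.List.slice_natCast]
    simp [PySem.List.pyGet?_natCast, show k+3-(k+1) = 2 by omega, show k+2-k = 2 by omega]

theorem pvScroll_map (xs : List (List String)) :
    (pvScroll xs).map (fun p => pvConv p.1 p.2) = pvMapLA xs none := by
  induction xs with
  | nil => rfl
  | cons a t ih =>
    rw [pvScroll_cons, List.map_cons, ih]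
    cases t <;> rfl

theorem pvA_eq_mapLA (xs : List (List String)) :
    sokuon_n_hatsuon_to_ipa_py xs = pvMapLA xs none := by
  show List.foldl (fun acc p => acc ++ [pvConv p.1 p.2]) [] (pvScroll xs) = _
  rw [PySem.List.foldl_append_singleton_eq_map (fun p => pvConv p.1 p.2) (pvScroll xs) []]
  simpa using pvScroll_map xs

theorem pvMapLA_concat (xs : List (List String)) (a : List String)
    (nxt : Option (List String)) :
    pvMapLA (xs ++ [a]) nxt = pvMapLA xs (some a) ++ [pvConv a nxt] := by
  induction xs with
  | nil => rfl
  | cons x t ih =>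
    cases t with
    | nil => rfl
    | cons b t' => simp only [List.cons_append, pvMapLA] at *; simp [ih]

theorem pvAltGo_reverse (xs : List (List String)) (nxt : Option (List String)) :
    (pvAltGo xs.reverse nxt).reverse = pvMapLA xs nxt := by
  induction xs using List.reverseRecOn generalizing nxt with
  | nil => rfl
  | append_singleton t a ih =>
    rw [pvMapLA_concat, ← ih (some a)]
    simp [pvAltGo, pvConv]

-- ===== VERDICT (by name: the statement is the Claim_ definition above) =====
theorem sokuon_n_hatsuon_to_ipa_py_spec : Claim_equal_sokuon_n_hatsuon_to_ipa_py := by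
  intro xs _ _
  unfold Spec_sokuon_n_hatsuon_to_ipa_py sokuon_n_hatsuon_to_ipa_py_alt
  rw [pvAltGo_reverse, pvA_eq_mapLA]
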